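-- pv_equiv track=rewrite | github.com/Gunkar16/Object-Detection-Arduino-2 | play.py | translate_detection_results
-- ===== SOURCE A (Python) =====
-- from collections import Counter
--
-- def pluralize(word, count):
--     if count == 1:
--         return word
--     if word.endswith("s") or word.endswith("x") or word.endswith("ch") or word.endswith("sh"):
--         return word + "es"
--     elif word.endswith("y"):
--         return word[:-1] + "ies"
--     else:
--         return word + "s"
--
-- def translate_detection_results(detection_results):
--     # Count the occurrences of each detected object
--     object_counts = Counter(detection_results)
--
--     # Generate the translated message
--     count = sum(object_counts.values())
--     if detection_results == ['']:
--         message = "Sorry, I cannot see anything here."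
--     else:
--         # Sort the items based on their count in descending order
--         object_count_items = sorted(object_counts.items(), key=lambda item: item[1], reverse=True)
--
--         if count == 1:
--             message = "There is "
--             obj = next(iter(object_counts))
--             message += f"1 {obj} in front of you."
--         else:
--             message = "There "
--             # Handle the case for mixed singular and plural objects
--             is_plural = any(cnt > 1 for cnt in object_counts.values())
--             if is_plural:
--                 message += "are "
--             else:
--                 message += "is "
--
--             for i, (obj, count) in enumerate(object_count_items):
--                 obj_plural = pluralize(obj, count)
--                 if count == 1:
--                     message += f"1 {obj}"
--                 else:
--                     message += f"{count} {obj_plural}"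
--                 if i < len(object_count_items) - 2:
--                     message += ", "
--                 elif i == len(object_count_items) - 2:
--                     message += " and "
--             message += " in front of you."
--
--     return message
-- ===== SOURCE B (Python) =====
-- def pluralize(word, count):
--     if count == 1:
--         return word
--     if word.endswith("s") or word.endswith("x") or word.endswith("ch") or word.endswith("sh"):
--         return word + "es"
--     elif word.endswith("y"):
--         return word[:-1] + "ies"
--     else:
--         return word + "s"
--
-- def translate_detection_results(detection_results):
--     if detection_results == ['']:
--         return "Sorry, I cannot see anything here."
--     if len(detection_results) == 1:
--         return f"There is 1 {detection_results[0]} in front of you."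
--     # count occurrences, first-occurrence order
--     counts = {}
--     for obj in detection_results:
--         counts[obj] = counts.get(obj, 0) + 1
--     # counting sort: bucket the objects by their count, then walk counts downwards
--     buckets = {}
--     for obj, k in counts.items():
--         buckets.setdefault(k, []).append(obj)
--     mx = max(counts.values(), default=0)
--     phrases = []
--     for c in range(mx, 0, -1):
--         for obj in buckets.get(c, []):
--             phrases.append(f"1 {obj}" if c == 1 else f"{c} {pluralize(obj, c)}")
--     verb = "are" if mx > 1 else "is"
--     if len(phrases) > 1:
--         body = ", ".join(phrases[:-1]) + " and " + phrases[-1]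
--     elif phrases:
--         body = phrases[0]
--     else:
--         body = ""
--     return f"There {verb} {body} in front of you."
-- ===== Notes on version B (the rewrite author's own statement) =====
-- stated objective: alternative
-- what changed: B replaces Counter plus the comparison sort with a counting sort: it tallies into a plain dict, groups the distinct objects into buckets keyed by their count, and walks the counts from the maximum down to 1 to emit the phrases (ties keep first-occurrence order, matching the stable sort); the sentence is then composed by joining the phrase list with ', ' and ' and ', and the is/are choice comes from whether the maximum count exceeds 1.
import Mathlib
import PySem

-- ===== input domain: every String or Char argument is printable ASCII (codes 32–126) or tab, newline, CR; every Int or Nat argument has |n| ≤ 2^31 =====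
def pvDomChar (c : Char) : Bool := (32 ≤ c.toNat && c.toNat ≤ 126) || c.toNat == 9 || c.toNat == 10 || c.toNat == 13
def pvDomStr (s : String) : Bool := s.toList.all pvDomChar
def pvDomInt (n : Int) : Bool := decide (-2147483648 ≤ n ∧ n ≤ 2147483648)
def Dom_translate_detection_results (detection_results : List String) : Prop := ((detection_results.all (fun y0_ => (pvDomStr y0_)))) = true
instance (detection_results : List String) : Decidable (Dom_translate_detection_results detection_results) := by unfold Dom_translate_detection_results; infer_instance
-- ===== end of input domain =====

-- B replaces Counter + comparison sort by a counting sort (buckets of objects keyed by their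
-- count, walked from the maximum count down to 1) and composes the sentence by joining the
-- phrase list; objective: alternative algorithm, same observable result.

-- ===== PORT A =====
-- shared module helper (both Pythons use the same pluralize)
def pluralize (word : String) (count : Int) : String :=
  if count == 1 then word
  else if PySem.Str.endswith word "s" || PySem.Str.endswith word "x"
       || PySem.Str.endswith word "ch" || PySem.Str.endswith word "sh" then word ++ "es"
  else if PySem.Str.endswith word "y" then PySem.Str.slice word none (some (-1)) ++ "ies"
  else word ++ "s"

def translate_detection_results (detection_results : List String) : String :=
  let object_counts := PySem.Dict.counter detection_results
  let count := object_counts.values.sum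
  if detection_results == [""] then
    "Sorry, I cannot see anything here."
  else
    let object_count_items := PySem.List.sorted object_counts.items (fun item => item.2) true
    if count == 1 then
      let obj := object_counts.keys.headD ""   -- next(iter(object_counts)); dict nonempty here
      "There is " ++ ("1 " ++ obj ++ " in front of you.")
    else
      let message := "There " ++ (if object_counts.values.any (fun cnt => decide (1 < cnt)) then "are " else "is ")
      let message := (PySem.List.enumerate object_count_items).foldl
        (fun message p =>
          let obj_plural := pluralize p.2.1 p.2.2
          let message := message ++ (if p.2.2 == 1 then "1 " ++ p.2.1
                                     else PySem.Int.toStr p.2.2 ++ " " ++ obj_plural)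
          if p.1 < (object_count_items.length : Int) - 2 then message ++ ", "
          else if p.1 == (object_count_items.length : Int) - 2 then message ++ " and "
          else message) message
      message ++ " in front of you."

-- ===== PORT B =====
def translate_detection_results_alt (detection_results : List String) : String :=
  if detection_results == [""] then
    "Sorry, I cannot see anything here."
  else if detection_results.length == 1 then
    "There is 1 " ++ detection_results.headD "" ++ " in front of you."   -- detection_results[0]
  else
    -- counts[obj] = counts.get(obj, 0) + 1
    let counts := detection_results.foldl (fun d x => d.insert x (d.getD x 0 + 1)) PySem.Dict.empty
    -- buckets.setdefault(k, []).append(obj)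
    let buckets := counts.items.foldl (fun d p => d.modify p.2 [] (fun l => l ++ [p.1])) PySem.Dict.empty
    let mx := PySem.List.maxD counts.values (fun v => v) 0
    let phrases := (PySem.List.pyRange mx 0 (-1)).foldl (fun acc c =>
        (buckets.getD c []).foldl (fun acc obj =>
          acc ++ [if c == 1 then "1 " ++ obj
                  else PySem.Int.toStr c ++ " " ++ pluralize obj c]) acc) []
    let verb := if 1 < mx then "are" else "is"
    let body :=
      if phrases.length > 1 then
        PySem.Str.join ", " (PySem.List.slice phrases none (some (-1))) ++ " and " ++ (phrases.getLast?.getD "")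
      else if !phrases.isEmpty then phrases.headD ""
      else ""
    "There " ++ verb ++ " " ++ body ++ " in front of you."

-- ===== PRECONDITION & SPEC =====
def Spec_translate_detection_results (detection_results : List String) (out : String) : Prop := out = translate_detection_results_alt detection_results
instance (detection_results : List String) (out : String) : Decidable (Spec_translate_detection_results detection_results out) := by unfold Spec_translate_detection_results; infer_instance

-- ===== CLAIM (what is proved, stated in full; the proofs are below) =====
def Claim_equal_translate_detection_results : Prop := ∀ (detection_results : List String), Dom_translate_detection_results detection_results → Spec_translate_detection_results detection_results (translate_detection_results detection_results)

-- ===== LEMMAS AND PROOFS =====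

-- the phrase built for one (object, count) item (both ports build exactly this string)
def phraseOf (p : String × Int) : String :=
  if p.2 == 1 then "1 " ++ p.1 else PySem.Int.toStr p.2 ++ " " ++ pluralize p.1 p.2

-- the sentence body: phrases separated by ", ", " and " before the last
def bodyB : List (String × Int) → String
  | [] => ""
  | [p] => phraseOf p
  | p :: q :: r => phraseOf p ++ (if r.isEmpty then " and " else ", ") ++ bodyB (q :: r)

lemma sum_indicator (l : List String) (a : String) (hnd : l.Nodup) (ha : a ∈ l) :
    (l.map (fun k => if k = a then (1 : Int) else 0)).sum = 1 := by
  induction l with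
  | nil => cases ha
  | cons b t ih =>
    by_cases hab : a = b
    · have hz : (t.map (fun k => if k = a then (1 : Int) else 0)).sum = 0 := by
        apply List.sum_eq_zero
        intro x hx
        obtain ⟨k, hk, rfl⟩ := List.mem_map.mp hx
        have hka : k ≠ a := by
          intro he
          subst he
          rw [hab] at hk
          exact (List.nodup_cons.mp hnd).1 hk
        simp [hka]
      simp [List.map_cons, List.sum_cons, hab.symm, hz]
    · have h : a ∈ t := (List.mem_cons.mp ha).resolve_left hab
      have hb : b ≠ a := fun he => hab he.symm
      simp [List.map_cons, List.sum_cons, hb,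
        ih (List.nodup_cons.mp hnd).2 h]

lemma count_sum (xs : List String) (l : List String) (hnd : l.Nodup)
    (hsub : ∀ x ∈ xs, x ∈ l) :
    (l.map (fun k => (List.count k xs : Int))).sum = xs.length := by
  induction xs with
  | nil => simp
  | cons a t ih =>
    have hsub' : ∀ x ∈ t, x ∈ l := fun x hx => hsub x (List.mem_cons_of_mem _ hx)
    have ha : a ∈ l := hsub a List.mem_cons_self
    have : (l.map (fun k => (List.count k (a :: t) : Int))).sum
        = (l.map (fun k => (List.count k t : Int) + (if k = a then (1 : Int) else 0))).sum := by
      congr 1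
      apply List.map_congr_left
      intro k _
      by_cases hk : k = a
      · simp [hk]
      · simp [hk, Ne.symm hk]
    rw [this, List.sum_map_add, ih hsub', sum_indicator l a hnd ha]
    push_cast [List.length_cons]
    ring

-- A's enumerate/index separator loop produces bodyB
lemma loopA_eq (n : Int) (t : List (String × Int)) : ∀ (i : Int) (acc : String), n = i + t.length →
    (PySem.List.enumerate t i).foldl
      (fun m p =>
        let m := m ++ phraseOf p.2
        if p.1 < n - 2 then m ++ ", " else if p.1 == n - 2 then m ++ " and " else m) acc
    = acc ++ bodyB t := by
  induction t with
  | nil => intro i acc _; simp [PySem.List.enumerate, bodyB]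
  | cons p t ih =>
    intro i acc hn
    rw [show PySem.List.enumerate (p :: t) i = (i, p) :: PySem.List.enumerate t (i + 1) from rfl]
    rw [List.foldl_cons]
    cases t with
    | nil =>
      have h1 : ¬ (i < n - 2) := by simp at hn; omega
      have h2 : (i == n - 2) = false := by simp at hn ⊢; omega
      simp only [h1, h2, if_false, Bool.false_eq_true, PySem.List.enumerate, List.foldl_nil, bodyB]
    | cons q r =>
      rw [ih (i + 1) _ (by simp at hn ⊢; omega)]
      by_cases hr : r = []
      · subst hr
        have h1 : ¬ (i < n - 2) := by simp at hn; omega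
        have h2 : (i == n - 2) = true := by simp at hn ⊢; omega
        simp only [h1, h2, if_false, if_true, bodyB, List.isEmpty_nil]
        simp [String.append_assoc]
      · have h1 : i < n - 2 := by
          have : 1 ≤ (r.length : Int) := by
            cases r with | nil => exact absurd rfl hr | cons s r' => simp
          simp at hn; omega
        have hre : r.isEmpty = false := by simp [hr]
        simp only [h1, if_true, bodyB, hre, Bool.false_eq_true, if_false]
        simp [String.append_assoc]

-- B's join/" and " composition produces bodyB
lemma bodyB_join (r : List (String × Int)) : ∀ (p q : String × Int),
    bodyB (p :: q :: r) =
      PySem.Str.join ", " (PySem.List.slice ((p :: q :: r).map phraseOf) none (some (-1)))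
        ++ " and " ++ (((p :: q :: r).map phraseOf).getLast?.getD "") := by
  induction r with
  | nil =>
    intro p q
    apply String.toList_inj.mp
    simp [bodyB, PySem.List.slice_to_neg_one, PySem.Str.toList_join, PySem.Chars.join_singleton]
  | cons s r' ih =>
    intro p q
    have hstep : bodyB (p :: q :: s :: r') = phraseOf p ++ ", " ++ bodyB (q :: s :: r') := by
      simp [bodyB, String.append_assoc]
    rw [hstep, ih q s]
    apply String.toList_inj.mp
    simp only [PySem.List.slice_to_neg_one, List.map_cons, List.dropLast_cons_of_ne_nil,
      ne_eq, List.cons_ne_nil, not_false_eq_true,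
      PySem.Str.toList_join, String.toList_append]
    simp [PySem.Chars.join_cons_cons, List.getLast?_cons_cons, List.append_assoc]

-- ---- counting-sort machinery ----

-- insertBy walks past a block it does not go before
lemma insertBy_append_not_before {α : Type} (before : α → α → Bool) (x : α) (as bs : List α)
    (h : ∀ a ∈ as, before x a = false) :
    PySem.List.insertBy before x (as ++ bs) = as ++ PySem.List.insertBy before x bs := by
  induction as with
  | nil => simp
  | cons a as' ih =>
    have ha := h a List.mem_cons_self
    simp [PySem.List.insertBy, ha, ih (fun a ha' => h a (List.mem_cons_of_mem _ ha'))]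

-- insertBy goes to the front of a block it goes before everywhere
lemma insertBy_all_before {α : Type} (before : α → α → Bool) (x : α) (bs : List α)
    (h : ∀ b ∈ bs, before x b = true) :
    PySem.List.insertBy before x bs = x :: bs := by
  cases bs with
  | nil => rfl
  | cons b bs' => simp [PySem.List.insertBy, h b List.mem_cons_self]

def bucketed (cs : List Int) (l : List (String × Int)) : List (String × Int) :=
  cs.flatMap (fun c => l.filter (fun p => p.2 == c))

lemma insert_into_bucketed (cs : List Int) (hcs : cs.Pairwise (fun a b => b < a))
    (x : String × Int) (l : List (String × Int)) (hx : x.2 ∈ cs) :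
    PySem.List.insertBy (fun a b => decide (b.2 < a.2)) x (bucketed cs l)
      = bucketed cs (l ++ [x]) := by
  induction cs with
  | nil => cases hx
  | cons c cs' ih =>
    have hlt : ∀ c' ∈ cs', c' < c := fun c' hc' => (List.pairwise_cons.mp hcs).1 c' hc'
    by_cases hxc : x.2 = c
    · have hskip : ∀ a ∈ l.filter (fun p => p.2 == c), (decide (a.2 < x.2) : Bool) = false := by
        intro a ha
        have : a.2 = c := by simpa using (List.of_mem_filter ha)
        simp [this, hxc]
      have hall : ∀ b ∈ bucketed cs' l, (decide (b.2 < x.2) : Bool) = true := by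
        intro b hb
        obtain ⟨c', hc', hbf⟩ := List.mem_flatMap.mp hb
        have : b.2 = c' := by simpa using (List.of_mem_filter hbf)
        simp [this, hxc]
        exact hlt c' hc'
      have hrest : bucketed cs' (l ++ [x]) = bucketed cs' l := by
        unfold bucketed
        apply List.flatMap_congr
        intro c' hc'
        have : (x.2 == c') = false := by
          simp [hxc]
          exact (ne_of_gt (hlt c' hc'))
        simp [List.filter_append, this]
      show PySem.List.insertBy _ x (l.filter (fun p => p.2 == c) ++ bucketed cs' l) = _
      rw [insertBy_append_not_before _ _ _ _ hskip, insertBy_all_before _ _ _ hall]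
      show _ = (l ++ [x]).filter (fun p => p.2 == c) ++ bucketed cs' (l ++ [x])
      rw [hrest, List.filter_append]
      simp [hxc]
    · have hx' : x.2 ∈ cs' := (List.mem_cons.mp hx).resolve_left hxc
      have hskip : ∀ a ∈ l.filter (fun p => p.2 == c), (decide (a.2 < x.2) : Bool) = false := by
        intro a ha
        have ha2 : a.2 = c := by simpa using (List.of_mem_filter ha)
        have : x.2 < c := hlt _ hx'
        simp [ha2]
        omega
      show PySem.List.insertBy _ x (l.filter (fun p => p.2 == c) ++ bucketed cs' l) = _
      rw [insertBy_append_not_before _ _ _ _ hskip, ih (List.pairwise_cons.mp hcs).2 hx']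
      show _ = (l ++ [x]).filter (fun p => p.2 == c) ++ bucketed cs' (l ++ [x])
      have : (x.2 == c) = false := by simp [hxc]
      simp [List.filter_append, this]

lemma foldl_insertBy_bucketed (cs : List Int) (hcs : cs.Pairwise (fun a b => b < a))
    (l : List (String × Int)) (hmem : ∀ p ∈ l, p.2 ∈ cs) :
    l.foldl (fun acc x => PySem.List.insertBy (fun a b => decide (b.2 < a.2)) x acc) []
      = bucketed cs l := by
  induction l using List.reverseRecOn with
  | nil => simp [bucketed]
  | append_singleton l x ih =>
    rw [List.foldl_append, List.foldl_cons, List.foldl_nil,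
      ih (fun p hp => hmem p (List.mem_append_left _ hp)),
      insert_into_bucketed cs hcs x l (hmem x (List.mem_append_right _ List.mem_cons_self))]

-- the stable descending sort IS the bucket walk
lemma sorted_eq_bucketed (cs : List Int) (hcs : cs.Pairwise (fun a b => b < a))
    (l : List (String × Int)) (hmem : ∀ p ∈ l, p.2 ∈ cs) :
    PySem.List.sorted l (fun item => item.2) true = bucketed cs l := by
  rw [PySem.List.sorted_rev_eq_foldl_insertBy]
  exact foldl_insertBy_bucketed cs hcs l hmem

-- range(m, 0, -1) explicitly
lemma pyRange_down (m : Int) (hm : 0 < m) :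
    PySem.List.pyRange m 0 (-1) = (List.range m.toNat).map (fun k : Nat => m - (k : Int)) := by
  simp only [PySem.List.pyRange]
  rw [if_neg (by norm_num), if_neg (by norm_num), if_pos hm]
  norm_num
  intro k _
  ring

lemma pyRange_down_pairwise (m : Int) :
    (PySem.List.pyRange m 0 (-1)).Pairwise (fun a b => b < a) := by
  by_cases hm : 0 < m
  · rw [pyRange_down m hm]
    apply List.Pairwise.map
    · intro a b (hab : a < b)
      omega
    · exact List.pairwise_lt_range
  · have : PySem.List.pyRange m 0 (-1) = [] := by
      simp only [PySem.List.pyRange]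
      norm_num
      omega
    simp [this]

lemma mem_pyRange_down (m v : Int) (h1 : 1 ≤ v) (h2 : v ≤ m) :
    v ∈ PySem.List.pyRange m 0 (-1) := by
  have hm : 0 < m := by omega
  rw [pyRange_down m hm]
  refine List.mem_map.mpr ⟨(m - v).toNat, ?_, by omega⟩
  refine List.mem_range.mpr ?_
  omega

lemma one_lt_foldl_max (t : List Int) : ∀ (a : Int),
    (1 < t.foldl max a ↔ 1 < a ∨ ∃ c ∈ t, 1 < c) := by
  induction t with
  | nil => intro a; simp
  | cons c t ih =>
    intro a
    rw [List.foldl_cons, ih (max a c)]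
    constructor
    · rintro (h | h)
      · rcases lt_or_ge a c with h' | h'
        · exact Or.inr ⟨c, List.mem_cons_self, by omega⟩
        · exact Or.inl (by omega)
      · obtain ⟨d, hd, hd1⟩ := h
        exact Or.inr ⟨d, List.mem_cons_of_mem _ hd, hd1⟩
    · rintro (h | ⟨d, hd, hd1⟩)
      · exact Or.inl (by omega)
      · rcases List.mem_cons.mp hd with rfl | hd'
        · exact Or.inl (by omega)
        · exact Or.inr ⟨d, hd', hd1⟩

lemma any_gt_one_eq_max (v : List Int) :
    (v.any (fun c => decide (1 < c))) = decide (1 < PySem.List.maxD v (fun x => x) 0) := by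
  cases v with
  | nil => rfl
  | cons a t =>
    rw [PySem.List.maxD_id_cons]
    apply Bool.eq_iff_iff.mpr
    simp only [List.any_eq_true, decide_eq_true_eq]
    rw [one_lt_foldl_max]
    constructor
    · rintro ⟨c, hc, h1c⟩
      rcases List.mem_cons.mp hc with rfl | hc'
      · exact Or.inl h1c
      · exact Or.inr ⟨c, hc', h1c⟩
    · rintro (h | ⟨c, hc, h1c⟩)
      · exact ⟨a, List.mem_cons_self, h⟩
      · exact ⟨c, List.mem_cons_of_mem _ hc, h1c⟩

lemma le_maxD (v : List Int) (c : Int) (hc : c ∈ v) :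
    c ≤ PySem.List.maxD v (fun x => x) 0 := by
  cases v with
  | nil => cases hc
  | cons a t =>
    rw [PySem.List.maxD_id_cons]
    rcases List.mem_cons.mp hc with rfl | hc'
    · exact (PySem.List.le_foldl_max t c).1
    · exact (PySem.List.le_foldl_max t a).2 c hc'

-- buckets.get(c, []) = objects whose count is c, in first-occurrence order
lemma buckets_getD (items : List (String × Int)) (c : Int) :
    (items.foldl (fun d p => d.modify p.2 [] (fun l => l ++ [p.1])) PySem.Dict.empty).getD c []
      = (items.filter (fun p => p.2 == c)).map (fun p => p.1) := by
  have h : items.foldl (fun d p => d.modify p.2 [] (fun l => l ++ [p.1])) PySem.Dict.empty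
      = (items.map (fun p => (p.2, p.1))).foldl
          (fun d q => d.modify q.1 [] (fun l => l ++ [q.2])) PySem.Dict.empty := by
    rw [List.foldl_map]
  rw [h, PySem.Dict.getD_foldl_modify_append]
  simp [List.filter_map, List.map_map, Function.comp_def]

lemma main_eq (xs : List String) :
    translate_detection_results xs = translate_detection_results_alt xs := by
  by_cases hE : xs = [""]
  · simp [translate_detection_results, translate_detection_results_alt, hE]
  · have hbe : (xs == [""]) = false := by simp [hE]
    have hcounts : xs.foldl (fun d x => d.insert x (d.getD x 0 + 1)) PySem.Dict.empty
        = PySem.Dict.counter xs := PySem.Dict.foldl_insert_getD_add_one_eq_counter xs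
    have hitems : (PySem.Dict.counter xs).items
        = (PySem.Set.ofList xs).map (fun k => (k, (xs.count k : Int))) :=
      PySem.Dict.items_counter xs
    have hvals : (PySem.Dict.counter xs).values
        = (PySem.Set.ofList xs).map (fun k => (List.count k xs : Int)) := by
      show ((PySem.Dict.counter xs).items.map (fun x => x.2)) = _
      rw [hitems]
      simp [List.map_map, Function.comp]
    have hsum : (PySem.Dict.counter xs).values.sum = (xs.length : Int) := by
      rw [hvals]
      exact count_sum xs _ (PySem.Set.nodup_ofList xs)
        (fun x hx => (PySem.Set.mem_ofList xs x).mpr hx)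
    have hge1 : ∀ c ∈ (PySem.Dict.counter xs).values, 1 ≤ c := by
      rw [hvals]
      intro c hc
      obtain ⟨k, hk, rfl⟩ := List.mem_map.mp hc
      have hkx : k ∈ xs := (PySem.Set.mem_ofList xs k).mp hk
      have := List.count_pos_iff.mpr hkx
      omega
    by_cases hl1 : xs.length = 1
    · obtain ⟨x, rfl⟩ := List.length_eq_one_iff.mp hl1
      have hset : PySem.Set.ofList [x] = [x] := rfl
      have hs1 : (PySem.Dict.counter [x]).values.sum = 1 := by rw [hsum]; rfl
      apply String.toList_inj.mp
      simp [translate_detection_results, translate_detection_results_alt, hbe,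
        PySem.Dict.keys_counter, hset, hs1]
    · -- main (plural / empty) branch
      have hc1 : ((PySem.Dict.counter xs).values.sum == 1) = false := by
        rw [hsum]
        simp
        omega
      have hb1 : (xs.length == 1) = false := by simp [hl1]
      -- abbreviations
      set items := (PySem.Dict.counter xs).items with hitems_def
      set mx := PySem.List.maxD (PySem.Dict.counter xs).values (fun v => v) 0 with hmx_def
      set cs := PySem.List.pyRange mx 0 (-1) with hcs_def
      have hmem : ∀ p ∈ items, p.2 ∈ cs := by
        intro p hp
        have hv : p.2 ∈ (PySem.Dict.counter xs).values :=
          List.mem_map.mpr ⟨p, hp, rfl⟩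
        exact mem_pyRange_down mx p.2 (hge1 _ hv) (le_maxD _ _ hv)
      have hsort : PySem.List.sorted items (fun item => item.2) true = bucketed cs items :=
        sorted_eq_bucketed cs (pyRange_down_pairwise mx) items hmem
      set t := bucketed cs items with ht_def
      -- A's message
      have hany : ((PySem.Dict.counter xs).values.any (fun c => decide (1 < c)))
          = decide (1 < mx) := any_gt_one_eq_max _
      have hA : translate_detection_results xs
          = ("There " ++ (if 1 < mx then "are " else "is "))
            ++ bodyB t ++ " in front of you." := by
        unfold translate_detection_results
        simp only [hbe, Bool.false_eq_true, if_false, hc1, ← hitems_def, hsort, hany,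
          decide_eq_true_eq]
        exact congrArg (· ++ " in front of you.")
          (loopA_eq (t.length : Int) t 0
            ("There " ++ (if 1 < mx then "are " else "is ")) (by simp))
      -- B's phrases
      have hphr : (cs.foldl (fun acc c =>
            (((items.foldl (fun d p => d.modify p.2 [] (fun l => l ++ [p.1]))
                PySem.Dict.empty)).getD c []).foldl (fun acc obj =>
              acc ++ [if c == 1 then "1 " ++ obj
                      else PySem.Int.toStr c ++ " " ++ pluralize obj c]) acc) [])
          = t.map phraseOf := by
        have hstep : ∀ (acc : List String), ∀ c ∈ cs,
            (((items.foldl (fun d p => d.modify p.2 [] (fun l => l ++ [p.1]))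
                PySem.Dict.empty)).getD c []).foldl (fun acc obj =>
              acc ++ [if c == 1 then "1 " ++ obj
                      else PySem.Int.toStr c ++ " " ++ pluralize obj c]) acc
            = acc ++ ((items.filter (fun p => p.2 == c)).map phraseOf) := by
          intro acc c _
          rw [buckets_getD, PySem.List.foldl_append_singleton_eq_map]
          congr 1
          rw [List.map_map]
          apply List.map_congr_left
          intro p hp
          have hpc : p.2 = c := by simpa using (List.of_mem_filter hp)
          simp [Function.comp, phraseOf, hpc]
        rw [PySem.List.foldl_congr_mem cs _
          (fun acc c => acc ++ ((items.filter (fun p => p.2 == c)).map phraseOf)) [] hstep]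
        rw [PySem.List.foldl_append_eq_flatMap]
        rw [ht_def]
        unfold bucketed
        simp [List.map_flatMap]
      have hB : translate_detection_results_alt xs
          = "There " ++ (if 1 < mx then "are" else "is")
            ++ " " ++ bodyB t ++ " in front of you." := by
        unfold translate_detection_results_alt
        simp only [hbe, Bool.false_eq_true, if_false, hb1, hcounts, ← hitems_def,
          ← hmx_def, ← hcs_def, hphr]
        cases t with
        | nil => simp [bodyB]
        | cons p r =>
          cases r with
          | nil => simp [bodyB]
          | cons q r' =>
            rw [bodyB_join r' p q]
            simp [String.append_assoc]
      rw [hA, hB]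
      by_cases hp : 1 < mx
      · simp only [hp, if_true]
        apply String.toList_inj.mp
        simp
      · simp only [hp, if_false]
        apply String.toList_inj.mp
        simp

-- ===== VERDICT (by name: the statement is the Claim_ definition above) =====
theorem translate_detection_results_spec : Claim_equal_translate_detection_results := by
  intro xs _
  unfold Spec_translate_detection_results
  exact main_eq xs
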